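-- pv_equiv track=rewrite | github.com/daviddanielarch-zz/code_samples | currency_exchage/app/trade/utils.py | pk_to_id
-- ===== SOURCE A (Python) =====
-- UID_MAX_REPR_VALUE = 36 ** 7 - 1  # Max number we can represent using a base 36 numeric system with 7 digits
--
-- def pk_to_id(n):
--     """
--     Converts a base 10 integer to an unique identifier following the format:
--     TR[NUMBER]
--     where NUMBER is the base 10 integer converted to base 36 and padded with 0 on the left to make its total length
--     equal 7.
--     For example pk_to_uid(1) == TR0000001
--     """
--     digits = "0123456789ABCDEFGHIJKLMNOPQRSTUVWXYZ"
--     base = 36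
--
--     try:
--         n = int(n)
--     except ValueError:
--         raise ValueError("number should be an integer")
--
--     if n > UID_MAX_REPR_VALUE:
--         raise ValueError("max representable value is {}".format(UID_MAX_REPR_VALUE))
--
--     if n < 0:
--         raise ValueError("number should be positive")
--
--     result = ""
--     while n > 0:
--         r = n % base
--         result = digits[r] + result
--         n = int(n / base)
--
--     return 'TR{}'.format(result.zfill(7))
-- ===== SOURCE B (Python) =====
-- UID_MAX_REPR_VALUE = 36 ** 7 - 1  # Max number we can represent using a base 36 numeric system with 7 digits
--
--
-- def pk_to_id(n):
--     digits = "0123456789ABCDEFGHIJKLMNOPQRSTUVWXYZ"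
--
--     try:
--         n = int(n)
--     except ValueError:
--         raise ValueError("number should be an integer")
--
--     if n > UID_MAX_REPR_VALUE:
--         raise ValueError("max representable value is {}".format(UID_MAX_REPR_VALUE))
--
--     if n < 0:
--         raise ValueError("number should be positive")
--
--     # fixed-width, high-to-low positional extraction: no loop-until-zero, no zfill
--     return 'TR' + ''.join(digits[(n // 36 ** (6 - i)) % 36] for i in range(7))
-- ===== Notes on version B (the rewrite author's own statement) =====
-- stated objective: simpler
-- what changed: Replaces the variable-length remainder loop plus zfill padding by direct fixed-width extraction of the 7 base-36 digits high-to-low (digits[(n // 36**(6-i)) % 36] for i in range(7)), eliminating the while loop and the padding step.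
import Mathlib
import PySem

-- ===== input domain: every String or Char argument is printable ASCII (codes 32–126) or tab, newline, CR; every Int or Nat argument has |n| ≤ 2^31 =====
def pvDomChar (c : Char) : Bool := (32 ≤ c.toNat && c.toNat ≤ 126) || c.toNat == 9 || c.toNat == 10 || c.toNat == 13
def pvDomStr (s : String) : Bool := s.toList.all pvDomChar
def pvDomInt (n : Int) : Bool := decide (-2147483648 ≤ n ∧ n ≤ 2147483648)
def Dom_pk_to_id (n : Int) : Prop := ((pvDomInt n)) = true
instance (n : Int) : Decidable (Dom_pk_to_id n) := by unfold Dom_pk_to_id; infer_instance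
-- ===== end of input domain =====

-- B replaces A's variable-length remainder loop + zfill by fixed-width positional
-- extraction of the 7 base-36 digits high-to-low (objective: simpler).
-- Pre_ excludes the inputs where the Python raises ValueError (n < 0 or n > 36^7-1).

-- ===== PORT A =====
def pkDigits : List Char := "0123456789ABCDEFGHIJKLMNOPQRSTUVWXYZ".toList

-- the while loop: result = digits[r] + result; n = int(n / 36)
-- (int(n / 36) equals n // 36 exactly on the whole admitted domain n ≤ 36^7-1 < 2^53)
def pkLoopA : Nat → List Char → List Char
  | 0, acc => acc
  | Nat.succ m, acc =>
      pkLoopA (Nat.succ m / 36) (pkDigits.getD (Nat.succ m % 36) '0' :: acc)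
  decreasing_by exact Nat.div_lt_self (Nat.succ_pos m) (by norm_num)

-- result.zfill(7)
def pkZfill7 (s : List Char) : List Char := List.replicate (7 - s.length) '0' ++ s

def pk_to_id (n : Int) : String :=
  if n > 36 ^ 7 - 1 then ""        -- Python raises ValueError here (outside Pre_)
  else if n < 0 then ""            -- Python raises ValueError here (outside Pre_)
  else "TR" ++ String.ofList (pkZfill7 (pkLoopA n.toNat []))

-- ===== PORT B =====
def pk_to_id_alt (n : Int) : String :=
  if n > 36 ^ 7 - 1 then ""        -- Python raises ValueError here (outside Pre_)
  else if n < 0 then ""            -- Python raises ValueError here (outside Pre_)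
  else "TR" ++ String.ofList
    ((List.range 7).map (fun i => pkDigits.getD ((n.toNat / 36 ^ (6 - i)) % 36) '0'))

-- ===== PRECONDITION & SPEC =====
-- Pre_ excludes exactly the inputs where A raises ValueError: n < 0 or n > 36^7-1.
def Pre_pk_to_id (n : Int) : Prop := 0 ≤ n ∧ n ≤ 36 ^ 7 - 1
instance (n : Int) : Decidable (Pre_pk_to_id n) := by unfold Pre_pk_to_id; infer_instance

def pvWitness_pk_to_id : Int := (1)

def Spec_pk_to_id (n : Int) (out : String) : Prop := out = pk_to_id_alt n
instance (n : Int) (out : String) : Decidable (Spec_pk_to_id n out) := by unfold Spec_pk_to_id; infer_instance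

-- ===== CLAIM (what is proved, stated in full; the proofs are below) =====
def Claim_equal_pk_to_id : Prop := ∀ (n : Int), Dom_pk_to_id n → Pre_pk_to_id n → Spec_pk_to_id n (pk_to_id n)

-- ===== LEMMAS AND PROOFS =====

theorem pkLoopA_append (n : Nat) : ∀ acc, pkLoopA n acc = pkLoopA n [] ++ acc := by
  induction n using Nat.strong_induction_on with
  | _ n ih =>
    match n with
    | 0 => intro acc; simp [pkLoopA]
    | Nat.succ m =>
      intro acc
      have hlt : Nat.succ m / 36 < Nat.succ m := Nat.div_lt_self (Nat.succ_pos m) (by norm_num)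
      rw [pkLoopA, pkLoopA, ih _ hlt, ih _ hlt (pkDigits.getD (Nat.succ m % 36) '0' :: [])]
      simp

theorem pkLoop_pad (k : Nat) : ∀ n, n < 36 ^ k →
    List.replicate (k - (pkLoopA n []).length) '0' ++ pkLoopA n [] =
      (List.range k).map (fun i => pkDigits.getD ((n / 36 ^ (k - 1 - i)) % 36) '0') := by
  induction k with
  | zero => intro n hn; interval_cases n; simp [pkLoopA]
  | succ k ih =>
    intro n hn
    match n with
    | 0 =>
      simp [pkLoopA, pkDigits]
    | Nat.succ m =>
      have hlt : Nat.succ m / 36 < 36 ^ k := by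
        have := (Nat.div_lt_iff_lt_mul (by norm_num : 0 < 36)).mpr
          (by rw [← pow_succ]; exact hn : Nat.succ m < 36 ^ k * 36)
        exact this
      have hrec : pkLoopA (Nat.succ m) [] =
          pkLoopA (Nat.succ m / 36) [] ++ [pkDigits.getD (Nat.succ m % 36) '0'] := by
        rw [pkLoopA, pkLoopA_append]
      rw [hrec]
      rw [List.range_succ, List.map_append]
      have hk : ∀ i ∈ List.range k,
          pkDigits.getD ((Nat.succ m / 36 ^ (k + 1 - 1 - i)) % 36) '0'
            = pkDigits.getD ((Nat.succ m / 36 / 36 ^ (k - 1 - i)) % 36) '0' := by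
        intro i hi
        simp only [List.mem_range] at hi
        have h1 : k + 1 - 1 - i = (k - 1 - i) + 1 := by omega
        rw [h1, pow_succ, Nat.div_div_eq_div_mul, Nat.mul_comm]
      rw [List.map_congr_left hk]
      have hlen : (pkLoopA (Nat.succ m / 36) [] ++ [pkDigits.getD (Nat.succ m % 36) '0']).length
          = (pkLoopA (Nat.succ m / 36) []).length + 1 := by simp
      rw [hlen]
      have harith : k + 1 - ((pkLoopA (Nat.succ m / 36) []).length + 1)
          = k - (pkLoopA (Nat.succ m / 36) []).length := by omega
      rw [harith, ← List.append_assoc, ih _ hlt]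
      simp

-- ===== VERDICT (by name: the statement is the Claim_ definition above) =====
theorem pk_to_id_spec : Claim_equal_pk_to_id := by
  intro n _ hpre
  obtain ⟨h0, h1⟩ := hpre
  unfold Spec_pk_to_id pk_to_id pk_to_id_alt
  rw [if_neg (by omega), if_neg (by omega), if_neg (by omega), if_neg (by omega)]
  have hn : n.toNat < 36 ^ 7 := by omega
  have := pkLoop_pad 7 n.toNat hn
  unfold pkZfill7
  rw [this]
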